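-- pv_equiv track=rewrite | github.com/Alita4195/helsinki-uni-python-Mooc- | part04-38_grade_statistics/src/grade_statistics.py | score_num
-- ===== SOURCE A (Python) =====
-- def score_num(score: list):
--     index = 0
--     exercise_points = []
--     exam_score_list = []
--     for j in score:
--         if index % 2 != 0:
--             integer = j // 10
--             index += 1
--             exercise_points.append(integer)
--         else:
--             exam_score_list.append(j)
--             index += 1
--
--     return exam_score_list, exercise_points
-- ===== SOURCE B (Python) =====
-- def score_num(score: list):
--     exam_score_list = []
--     exercise_points = []
--     i = 0
--     n = len(score)
--     while i + 1 < n: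
--         exam_score_list.append(score[i])
--         exercise_points.append(score[i + 1] // 10)
--         i += 2
--     if i < n:
--         exam_score_list.append(score[i])
--     return exam_score_list, exercise_points
-- ===== Notes on version B (the rewrite author's own statement) =====
-- stated objective: alternative
-- what changed: Replaced the single loop with an index counter and a parity branch by a stride-2 while loop that consumes one (exam, exercise) pair per iteration, with the trailing odd element handled once after the loop; no parity test remains.
import Mathlib
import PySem

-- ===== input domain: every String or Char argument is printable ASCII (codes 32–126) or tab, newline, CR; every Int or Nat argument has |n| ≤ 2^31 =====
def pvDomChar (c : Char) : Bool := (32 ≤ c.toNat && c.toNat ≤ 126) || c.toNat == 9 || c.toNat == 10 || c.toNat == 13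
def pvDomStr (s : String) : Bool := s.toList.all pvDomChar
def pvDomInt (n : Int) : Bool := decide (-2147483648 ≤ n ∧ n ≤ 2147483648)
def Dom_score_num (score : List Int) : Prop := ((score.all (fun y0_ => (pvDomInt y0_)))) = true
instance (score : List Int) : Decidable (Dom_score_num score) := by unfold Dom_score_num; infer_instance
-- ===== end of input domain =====

-- B replaces A's indexed parity loop by a pairwise structural recursion (alternative decomposition, same cost).


-- ===== PORT A =====
-- A's loop body as a named helper; fold over score with state (index, exercise_points, exam_score_list)
def score_num_step (st : Int × List Int × List Int) (j : Int) : Int × List Int × List Int :=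
  let index := st.1
  let exercise_points := st.2.1
  let exam_score_list := st.2.2
  if PySem.Int.mod index 2 ≠ 0 then
    let integer := PySem.Int.floordiv j 10
    (index + 1, exercise_points ++ [integer], exam_score_list)
  else
    (index + 1, exercise_points, exam_score_list ++ [j])

def score_num (score : List Int) : List Int × List Int :=
  let st := score.foldl score_num_step (0, [], [])
  (st.2.2, st.2.1)

-- ===== PORT B =====
-- Source B's while loop: consume a pair (score[i], score[i+1]) per step, i += 2; trailing single element after the loop
def score_num_go (score : List Int) (i : Nat) (exam ex : List Int) : List Int × List Int :=
  if h : i + 1 < score.length then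
    score_num_go score (i + 2) (exam ++ [score[i]]) (ex ++ [PySem.Int.floordiv score[i + 1] 10])
  else if h2 : i < score.length then (exam ++ [score[i]], ex)
  else (exam, ex)
termination_by score.length - i

def score_num_alt (score : List Int) : List Int × List Int :=
  score_num_go score 0 [] []

-- ===== PRECONDITION & SPEC =====
def Spec_score_num (score : List Int) (out : List Int × List Int) : Prop := out = score_num_alt score
instance (score : List Int) (out : List Int × List Int) : Decidable (Spec_score_num score out) := by unfold Spec_score_num; infer_instance

-- ===== CLAIM (what is proved, stated in full; the proofs are below) =====
def Claim_equal_score_num : Prop := ∀ (score : List Int), Dom_score_num score → Spec_score_num score (score_num score)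

-- ===== LEMMAS AND PROOFS =====

-- both sides are characterised against this two-at-a-time split of the list
def pairSplit : List Int → List Int × List Int
  | [] => ([], [])
  | [a] => ([a], [])
  | a :: b :: rest =>
    let p := pairSplit rest
    (a :: p.1, PySem.Int.floordiv b 10 :: p.2)

theorem score_num_loop (l : List Int) (ex exam : List Int) (i : Int)
    (hi : PySem.Int.mod i 2 = 0) :
    l.foldl score_num_step (i, ex, exam)
    = (i + l.length, ex ++ (pairSplit l).2, exam ++ (pairSplit l).1) := by
  have hm : ∀ x : Int, PySem.Int.mod x 2 = x % 2 := fun x =>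
    PySem.Int.mod_eq_emod_of_pos (by norm_num)
  fun_induction pairSplit l generalizing ex exam i with
  | case1 => simp
  | case2 a =>
    simp only [List.foldl_cons, List.foldl_nil, score_num_step]
    rw [if_neg (by rw [hm] at hi ⊢; omega)]
    simp
  | case3 a b rest p ih =>
    have h1 : PySem.Int.mod (i + 1) 2 ≠ 0 := by rw [hm] at *; omega
    have h2 : PySem.Int.mod (i + 1 + 1) 2 = 0 := by rw [hm] at *; omega
    simp only [List.foldl_cons]
    rw [show score_num_step (i, ex, exam) a = (i + 1, ex, exam ++ [a]) by
          simp only [score_num_step]; rw [if_neg (by rw [hm] at hi ⊢; omega)],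
        show score_num_step (i + 1, ex, exam ++ [a]) b
            = (i + 1 + 1, ex ++ [PySem.Int.floordiv b 10], exam ++ [a]) by
          simp only [score_num_step]; rw [if_pos h1],
        ih _ _ _ h2]
    simp [p]
    omega

theorem drop_pair (score : List Int) (i : Nat) (h : i + 1 < score.length) :
    score.drop i = score[i] :: score[i + 1] :: score.drop (i + 2) := by
  rw [List.drop_eq_getElem_cons (show i < score.length by omega),
      List.drop_eq_getElem_cons (show i + 1 < score.length by omega)]

theorem go_eq (score : List Int) (i : Nat) (exam ex : List Int) :
    score_num_go score i exam ex
    = (exam ++ (pairSplit (score.drop i)).1, ex ++ (pairSplit (score.drop i)).2) := by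
  fun_induction score_num_go score i exam ex with
  | case1 i exam ex h ih =>
    rw [ih, drop_pair score i h]
    simp [pairSplit]
  | case2 i exam ex h h2 =>
    have : score.drop i = [score[i]] := by
      rw [List.drop_eq_getElem_cons h2]
      rw [List.drop_eq_nil_iff.mpr (by omega)]
    simp [this, pairSplit]
  | case3 i exam ex h h2 =>
    have : score.drop i = [] := List.drop_eq_nil_iff.mpr (by omega)
    simp [this, pairSplit]

-- ===== VERDICT (by name: the statement is the Claim_ definition above) =====
theorem score_num_spec : Claim_equal_score_num := by
  intro score _
  unfold Spec_score_num score_num score_num_alt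
  rw [score_num_loop score [] [] 0 (by decide), go_eq]
  simp
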